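-- pv_equiv track=rewrite | github.com/ai-2070/l0-python | l0/window.py | _chunk_by_boundaries
-- ===== SOURCE A (Python) =====
-- def estimate_chars_for_tokens(token_count: int) -> int:
--     """Estimate character count for a given token count."""
--     return token_count * 4
--
-- def _chunk_by_boundaries(
--     document: str,
--     boundaries: list[int],
--     size: int,
--     overlap: int,
-- ) -> list[tuple[int, int]]:
--     """Chunk document respecting boundaries (paragraphs or sentences)."""
--     chunks: list[tuple[int, int]] = []
--     char_size = estimate_chars_for_tokens(size)
--     char_overlap = estimate_chars_for_tokens(overlap)
--
--     # Ensure overlap is less than size to guarantee forward progress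
--     if char_overlap >= char_size:
--         char_overlap = max(0, char_size - 1)
--
--     i = 0
--     while i < len(boundaries) - 1:
--         start_pos = boundaries[i]
--         end_pos = start_pos
--
--         # Accumulate boundaries until we reach size
--         j = i + 1
--         while j < len(boundaries):
--             next_pos = boundaries[j]
--             if next_pos - start_pos > char_size and end_pos > start_pos:
--                 break
--             end_pos = next_pos
--             j += 1
--
--         if end_pos > start_pos:
--             chunks.append((start_pos, end_pos))
--
--         # If we've reached the end of the document, stop
--         if end_pos >= len(document):
--             break
--
--         # Find overlap start position
--         overlap_start = max(start_pos, end_pos - char_overlap)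
--         # Find the boundary closest to overlap_start
--         new_i = i
--         for k in range(i, len(boundaries)):
--             if boundaries[k] >= overlap_start:
--                 new_i = k
--                 break
--
--         # Ensure progress
--         if new_i <= i:
--             new_i = i + 1
--         i = new_i
--
--         if i >= len(boundaries) - 1:
--             break
--
--     return chunks
-- ===== SOURCE B (Python) =====
-- def _chunk_by_boundaries(
--     document: str,
--     boundaries: list[int],
--     size: int,
--     overlap: int,
-- ) -> list[tuple[int, int]]:
--     """Chunk document respecting boundaries; suffix-based traversal."""
--     char_size = 4 * size
--     char_overlap = 4 * overlap
--     if char_overlap >= char_size: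
--         char_overlap = max(0, char_size - 1)
--     doc_len = len(document)
--
--     chunks: list[tuple[int, int]] = []
--     tail = boundaries
--     while len(tail) >= 2:
--         start = tail[0]
--         rest = tail[1:]
--         end = rest[0]
--         for nxt in rest[1:]:
--             if nxt - start > char_size and end > start:
--                 break
--             end = nxt
--         if end > start:
--             chunks.append((start, end))
--         if end >= doc_len:
--             break
--         overlap_start = max(start, end - char_overlap)
--         drop = next((k for k, pos in enumerate(tail) if pos >= overlap_start), 0)
--         if drop == 0:
--             drop = 1
--         tail = tail[drop:]
--     return chunks
-- ===== Notes on version B (the rewrite author's own statement) =====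
-- stated objective: alternative
-- what changed: B replaces A's index-arithmetic while loops (absolute indices i/j/k into boundaries with getD-style lookups and manual break flags) by a traversal over explicit suffix slices of the boundary list: the chunk end is found by scanning the remaining boundary values directly (carrying the previous value), the next window start becomes a first-match offset (next/enumerate, findIdx? in the port) and the loop advances by re-slicing the suffix.
import Mathlib
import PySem

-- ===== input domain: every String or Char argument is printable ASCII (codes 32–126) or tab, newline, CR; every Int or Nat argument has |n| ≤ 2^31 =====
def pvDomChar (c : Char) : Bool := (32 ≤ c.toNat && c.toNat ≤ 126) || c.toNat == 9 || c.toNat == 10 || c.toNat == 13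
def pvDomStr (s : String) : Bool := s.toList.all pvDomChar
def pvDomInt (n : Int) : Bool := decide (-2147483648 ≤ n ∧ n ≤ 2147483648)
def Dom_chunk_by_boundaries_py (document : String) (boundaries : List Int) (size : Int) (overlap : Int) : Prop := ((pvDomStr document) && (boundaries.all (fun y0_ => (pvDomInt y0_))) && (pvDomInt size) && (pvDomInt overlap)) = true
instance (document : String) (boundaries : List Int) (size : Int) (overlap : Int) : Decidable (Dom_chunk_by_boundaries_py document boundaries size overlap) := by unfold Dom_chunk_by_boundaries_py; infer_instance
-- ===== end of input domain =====

-- B re-traverses the same suffix scans of A over explicit suffix lists (pattern matching,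
-- zip-style value iteration, findIdx?) instead of A's index arithmetic; objective: alternative
-- (same asymptotic cost, exact same return value on every input — A is total).

-- ===== PORT A =====
def pvEstimate (token_count : Int) : Int := token_count * 4

-- inner 'while j < len(boundaries): …' accumulation loop of A
def pvAAccum (b : List Int) (charSize start endPos : Int) (j : Nat) : Int :=
  if _h : j < b.length then
    let next := b.getD j 0
    if next - start > charSize ∧ endPos > start then endPos
    else pvAAccum b charSize start next (j + 1)
  else endPos
termination_by b.length - j

-- 'for k in range(i, len(boundaries)): if boundaries[k] >= overlap_start: new_i = k; break'
def pvAFind (b : List Int) (ovs : Int) (k : Nat) : Option Nat :=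
  if _h : k < b.length then
    if b.getD k 0 ≥ ovs then some k else pvAFind b ovs (k + 1)
  else none
termination_by b.length - k

-- outer 'while i < len(boundaries) - 1' loop of A
def pvALoop (docLen : Int) (b : List Int) (charSize charOverlap : Int) (i : Nat)
    (acc : List (Int × Int)) : List (Int × Int) :=
  if _h : i + 1 < b.length then
    let start := b.getD i 0
    let endPos := pvAAccum b charSize start start (i + 1)
    let acc' := if endPos > start then acc ++ [(start, endPos)] else acc
    if endPos ≥ docLen then acc'
    else
      let ovs := max start (endPos - charOverlap)
      let ni0 := (pvAFind b ovs i).getD i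
      pvALoop docLen b charSize charOverlap (if ni0 ≤ i then i + 1 else ni0) acc'
  else acc
termination_by b.length - i
decreasing_by split <;> omega

def chunk_by_boundaries_py (document : String) (boundaries : List Int) (size : Int) (overlap : Int) : List (Int × Int) :=
  let charSize := pvEstimate size
  let co0 := pvEstimate overlap
  let charOverlap := if co0 ≥ charSize then max 0 (charSize - 1) else co0
  pvALoop (PySem.Str.len document) boundaries charSize charOverlap 0 []

-- ===== PORT B =====
-- 'for nxt in rest[1:]: …' of B: scans the remaining boundary values, carrying the previous one
def pvBFindEnd (start charSize : Int) (endPos : Int) : List Int → Int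
  | [] => endPos
  | nxt :: rest =>
    if nxt - start > charSize ∧ endPos > start then endPos
    else pvBFindEnd start charSize nxt rest

-- 'while len(tail) >= 2: …' of B, tail = a suffix of boundaries
def pvBLoop (docLen charSize charOverlap : Int) (tail : List Int)
    (acc : List (Int × Int)) : List (Int × Int) :=
  match tail with
  | t0 :: t1 :: rest =>
    let start := t0
    let endPos := pvBFindEnd start charSize t1 rest
    let acc' := if endPos > start then acc ++ [(start, endPos)] else acc
    if endPos ≥ docLen then acc'
    else
      let ovs := max start (endPos - charOverlap)
      let d0 := ((t0 :: t1 :: rest).findIdx? (fun pos => decide (pos ≥ ovs))).getD 0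
      let d := if d0 = 0 then 1 else d0
      pvBLoop docLen charSize charOverlap ((t0 :: t1 :: rest).drop d) acc'
  | _ => acc
termination_by tail.length
decreasing_by simp only [List.length_drop, List.length_cons]; split <;> omega

def chunk_by_boundaries_py_alt (document : String) (boundaries : List Int) (size : Int) (overlap : Int) : List (Int × Int) :=
  let charSize := 4 * size
  let co0 := 4 * overlap
  let charOverlap := if co0 ≥ charSize then max 0 (charSize - 1) else co0
  pvBLoop (PySem.Str.len document) charSize charOverlap boundaries []

-- ===== PRECONDITION & SPEC =====
def Spec_chunk_by_boundaries_py (document : String) (boundaries : List Int) (size : Int) (overlap : Int) (out : List (Int × Int)) : Prop := out = chunk_by_boundaries_py_alt document boundaries size overlap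
instance (document : String) (boundaries : List Int) (size : Int) (overlap : Int) (out : List (Int × Int)) : Decidable (Spec_chunk_by_boundaries_py document boundaries size overlap out) := by unfold Spec_chunk_by_boundaries_py; infer_instance

-- ===== CLAIM (what is proved, stated in full; the proofs are below) =====
def Claim_equal_chunk_by_boundaries_py : Prop := ∀ (document : String) (boundaries : List Int) (size : Int) (overlap : Int), Dom_chunk_by_boundaries_py document boundaries size overlap → Spec_chunk_by_boundaries_py document boundaries size overlap (chunk_by_boundaries_py document boundaries size overlap)

-- ===== LEMMAS AND PROOFS =====

theorem pvAccum_eq (b : List Int) (cs s : Int) (j : Nat) (e : Int) :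
    pvAAccum b cs s e j = pvBFindEnd s cs e (b.drop j) := by
  rw [pvAAccum]
  by_cases h : j < b.length
  · rw [List.drop_eq_getElem_cons h, pvBFindEnd]
    simp only [h, dif_pos, List.getD_eq_getElem b 0 h]
    split
    · rfl
    · exact pvAccum_eq b cs s (j + 1) b[j]
  · rw [List.drop_eq_nil_of_le (Nat.le_of_not_lt h)]
    simp [h, pvBFindEnd]
termination_by b.length - j
decreasing_by omega

theorem pvFind_eq (b : List Int) (ovs : Int) (k : Nat) :
    pvAFind b ovs k = ((b.drop k).findIdx? (fun pos => decide (pos ≥ ovs))).map (· + k) := by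
  rw [pvAFind]
  by_cases h : k < b.length
  · rw [List.drop_eq_getElem_cons h, List.findIdx?_cons]
    simp only [h, dif_pos, List.getD_eq_getElem b 0 h]
    split
    · rename_i hc
      simp [hc]
    · rename_i hc
      rw [pvFind_eq b ovs (k + 1), if_neg (by simpa using hc)]
      cases hfix : List.findIdx? (fun pos => decide (pos ≥ ovs)) (List.drop (k + 1) b) with
      | none => rfl
      | some n => simp only [Option.map_some]; congr 1; omega
  · rw [List.drop_eq_nil_of_le (Nat.le_of_not_lt h)]
    simp [h]
termination_by b.length - k
decreasing_by omega

theorem pvLoop_eq (docLen : Int) (b : List Int) (cs co : Int) (i : Nat) (acc : List (Int × Int)) :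
    pvALoop docLen b cs co i acc = pvBLoop docLen cs co (b.drop i) acc := by
  rw [pvALoop]
  by_cases h : i + 1 < b.length
  · have hi : i < b.length := by omega
    have hdrop : b.drop i = b[i] :: b[i + 1] :: b.drop (i + 2) := by
      rw [List.drop_eq_getElem_cons hi, List.drop_eq_getElem_cons h]
    rw [hdrop, pvBLoop]
    simp only [h, dif_pos, List.getD_eq_getElem b 0 hi]
    have hend : pvAAccum b cs b[i] b[i] (i + 1) = pvBFindEnd b[i] cs b[i + 1] (b.drop (i + 2)) := by
      rw [pvAccum_eq, List.drop_eq_getElem_cons h, pvBFindEnd]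
      simp
    rw [hend]
    split
    · rfl
    · have hfind := pvFind_eq b (max b[i] (pvBFindEnd b[i] cs b[i + 1] (b.drop (i + 2)) - co)) i
      rw [hfind, ← hdrop]
      set ovs := max b[i] (pvBFindEnd b[i] cs b[i + 1] (b.drop (i + 2)) - co) with hovs
      cases hfi : (b.drop i).findIdx? (fun pos => decide (pos ≥ ovs)) with
      | none =>
        simp only [Option.map_none, Option.getD_none, le_refl, if_pos]
        rw [pvLoop_eq docLen b cs co (i + 1) _]
        congr 1
        rw [List.drop_drop]
      | some k =>
        simp only [Option.map_some, Option.getD_some]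
        by_cases hk : k = 0
        · subst hk
          simp only [Nat.zero_add, le_refl, if_pos]
          rw [pvLoop_eq docLen b cs co (i + 1) _]
          congr 1
          rw [List.drop_drop]
        · rw [if_neg (by omega), if_neg hk]
          rw [pvLoop_eq docLen b cs co (k + i) _]
          congr 1
          rw [List.drop_drop]
          congr 1
          omega
  · have hlen : (b.drop i).length ≤ 1 := by
      simp only [List.length_drop]; omega
    simp only [h, dif_neg, not_false_iff]
    match hd : b.drop i with
    | [] => rw [pvBLoop]; intro t0 t1 rest hx; simp at hx
    | [x] => rw [pvBLoop]; intro t0 t1 rest hx; simp at hx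
    | x :: y :: r => rw [hd] at hlen; simp at hlen
termination_by b.length - i
decreasing_by
  · omega
  · omega
  · have hk' := List.findIdx?_eq_some_iff_findIdx_eq.mp hfi
    omega

-- ===== VERDICT (by name: the statement is the Claim_ definition above) =====
theorem chunk_by_boundaries_py_spec : Claim_equal_chunk_by_boundaries_py := by
  intro document boundaries size overlap _
  unfold Spec_chunk_by_boundaries_py chunk_by_boundaries_py chunk_by_boundaries_py_alt pvEstimate
  simp only [mul_comm]
  rw [pvLoop_eq]
  rfl
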